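-- pv_equiv track=rewrite | github.com/skyshy0707/random_numb_gen_based_on_ir_nums | PRING_IRRN.py | quartet
-- ===== SOURCE A (Python) =====
-- def quartet(n):
-- 	n = n % (100**4)
-- 	P = [n % 100]
-- 	while n > 99:
-- 		n = n // 100
-- 		q = n % 100
-- 		P.append(q)
-- 	while len(P) < 4:
-- 		P.append(0)
-- 	return P
-- ===== SOURCE B (Python) =====
-- def quartet(n):
--     m = n % 100**4
--     return [m % 100, m // 100 % 100, m // 10000 % 100, m // 1000000 % 100]
-- ===== Notes on version B (the rewrite author's own statement) =====
-- stated objective: simpler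
-- what changed: Replaces the value-dependent while loop with running quotient plus a separate pad-to-4 loop by directly reading each of the four base-100 digits off its place value (m // 100**i % 100).
import Mathlib
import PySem

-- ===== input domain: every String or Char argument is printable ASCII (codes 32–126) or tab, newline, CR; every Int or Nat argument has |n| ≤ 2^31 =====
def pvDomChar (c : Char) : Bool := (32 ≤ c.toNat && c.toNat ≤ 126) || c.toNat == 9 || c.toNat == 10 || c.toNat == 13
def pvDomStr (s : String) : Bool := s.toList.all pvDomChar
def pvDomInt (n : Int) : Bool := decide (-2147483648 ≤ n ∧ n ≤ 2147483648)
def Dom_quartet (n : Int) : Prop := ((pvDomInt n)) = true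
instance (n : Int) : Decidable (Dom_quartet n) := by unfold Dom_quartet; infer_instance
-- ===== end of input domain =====

-- B reads each of the four base-100 digits directly off its place value instead of A's
-- running-quotient while loop followed by a pad-to-4 loop (objective: simpler).

-- ===== PORT A =====
-- while n > 99: n = n // 100; P.append(n % 100)
def quartetDigits (n : Int) (P : List Int) : List Int :=
  if 99 < n then
    quartetDigits (PySem.Int.floordiv n 100)
      (P ++ [PySem.Int.mod (PySem.Int.floordiv n 100) 100])
  else P
termination_by n.toNat
decreasing_by
  rw [PySem.Int.floordiv_eq_ediv_of_pos (by norm_num)]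
  omega

-- while len(P) < 4: P.append(0)
def quartetPad (P : List Int) : List Int :=
  if P.length < 4 then quartetPad (P ++ [0]) else P
termination_by 4 - P.length
decreasing_by simp; omega

def quartet (n : Int) : List Int :=
  quartetPad (quartetDigits (PySem.Int.mod n (100 ^ 4))
    [PySem.Int.mod (PySem.Int.mod n (100 ^ 4)) 100])

-- ===== PORT B =====
def quartet_alt (n : Int) : List Int :=
  [ PySem.Int.mod (PySem.Int.mod n (100 ^ 4)) 100
  , PySem.Int.mod (PySem.Int.floordiv (PySem.Int.mod n (100 ^ 4)) 100) 100
  , PySem.Int.mod (PySem.Int.floordiv (PySem.Int.mod n (100 ^ 4)) 10000) 100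
  , PySem.Int.mod (PySem.Int.floordiv (PySem.Int.mod n (100 ^ 4)) 1000000) 100 ]

-- ===== PRECONDITION & SPEC =====
def Spec_quartet (n : Int) (out : List Int) : Prop := out = quartet_alt n
instance (n : Int) (out : List Int) : Decidable (Spec_quartet n out) := by unfold Spec_quartet; infer_instance

-- ===== CLAIM (what is proved, stated in full; the proofs are below) =====
def Claim_equal_quartet : Prop := ∀ (n : Int), Dom_quartet n → Spec_quartet n (quartet n)

-- ===== LEMMAS AND PROOFS =====

theorem pvMod100 (a : Int) : PySem.Int.mod a 100 = a % 100 :=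
  PySem.Int.mod_eq_emod_of_pos (by norm_num)

theorem pvDiv100 (a : Int) : PySem.Int.floordiv a 100 = a / 100 :=
  PySem.Int.floordiv_eq_ediv_of_pos (by norm_num)

theorem pvDiv10000 (a : Int) : PySem.Int.floordiv a 10000 = a / 10000 :=
  PySem.Int.floordiv_eq_ediv_of_pos (by norm_num)

theorem pvDiv1000000 (a : Int) : PySem.Int.floordiv a 1000000 = a / 1000000 :=
  PySem.Int.floordiv_eq_ediv_of_pos (by norm_num)

theorem quartetDigits_stop (n : Int) (P : List Int) (h : ¬ 99 < n) :
    quartetDigits n P = P := by rw [quartetDigits]; simp [h]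

theorem quartetDigits_step (n : Int) (P : List Int) (h : 99 < n) :
    quartetDigits n P =
      quartetDigits (PySem.Int.floordiv n 100)
        (P ++ [PySem.Int.mod (PySem.Int.floordiv n 100) 100]) := by
  rw [quartetDigits]; simp [h]

theorem quartetPad_step (P : List Int) (h : P.length < 4) :
    quartetPad P = quartetPad (P ++ [0]) := by rw [quartetPad]; simp [h]

theorem quartetPad_stop (P : List Int) (h : ¬ P.length < 4) :
    quartetPad P = P := by rw [quartetPad]; simp [h]

theorem pad1 (a : Int) : quartetPad [a] = [a, 0, 0, 0] := by
  rw [quartetPad_step _ (by simp), quartetPad_step _ (by simp),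
      quartetPad_step _ (by simp), quartetPad_stop _ (by simp)]
  simp

theorem pad2 (a b : Int) : quartetPad [a, b] = [a, b, 0, 0] := by
  rw [quartetPad_step _ (by simp), quartetPad_step _ (by simp),
      quartetPad_stop _ (by simp)]
  simp

theorem pad3 (a b c : Int) : quartetPad [a, b, c] = [a, b, c, 0] := by
  rw [quartetPad_step _ (by simp), quartetPad_stop _ (by simp)]
  simp

theorem pad4 (a b c d : Int) : quartetPad [a, b, c, d] = [a, b, c, d] :=
  quartetPad_stop _ (by simp)


theorem pad2' (a b : Int) : quartetPad ([a] ++ [b]) = [a, b, 0, 0] := pad2 a b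

theorem pad3' (a b c : Int) : quartetPad ([a] ++ [b] ++ [c]) = [a, b, c, 0] := pad3 a b c

theorem pad4' (a b c d : Int) : quartetPad ([a] ++ [b] ++ [c] ++ [d]) = [a, b, c, d] := pad4 a b c d

theorem quartet_core (m : Int) (h0 : 0 ≤ m) (h4 : m < 100000000) :
    quartetPad (quartetDigits m [PySem.Int.mod m 100]) =
      [ PySem.Int.mod m 100
      , PySem.Int.mod (PySem.Int.floordiv m 100) 100
      , PySem.Int.mod (PySem.Int.floordiv m 10000) 100
      , PySem.Int.mod (PySem.Int.floordiv m 1000000) 100 ] := by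
  by_cases h1 : m ≤ 99
  · rw [quartetDigits_stop _ _ (by omega), pad1]
    simp only [pvMod100, pvDiv100, pvDiv10000, pvDiv1000000, List.cons.injEq,
      true_and, and_true]
    all_goals omega
  · by_cases h2 : m ≤ 9999
    · rw [quartetDigits_step _ _ (by omega),
        quartetDigits_stop _ _ (by rw [pvDiv100]; omega), pad2']
      simp only [pvMod100, pvDiv100, pvDiv10000, pvDiv1000000, List.cons.injEq,
        true_and, and_true]
      all_goals omega
    · by_cases h3 : m ≤ 999999
      · rw [quartetDigits_step _ _ (by omega),
          quartetDigits_step _ _ (by rw [pvDiv100]; omega),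
          quartetDigits_stop _ _ (by simp only [pvDiv100]; omega), pad3']
        simp only [pvMod100, pvDiv100, pvDiv10000, pvDiv1000000, List.cons.injEq,
          true_and, and_true]
        all_goals omega
      · rw [quartetDigits_step _ _ (by omega),
          quartetDigits_step _ _ (by rw [pvDiv100]; omega),
          quartetDigits_step _ _ (by simp only [pvDiv100]; omega),
          quartetDigits_stop _ _ (by simp only [pvDiv100]; omega), pad4']
        simp only [pvMod100, pvDiv100, pvDiv10000, pvDiv1000000, List.cons.injEq,
          true_and, and_true]
        all_goals omega

theorem quartet_spec_aux (n : Int) : quartet n = quartet_alt n := by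
  unfold quartet quartet_alt
  have hb : (0:Int) < 100 ^ 4 := by norm_num
  have h0 : 0 ≤ PySem.Int.mod n (100 ^ 4) := by
    rw [PySem.Int.mod_eq_emod_of_pos hb]
    exact Int.emod_nonneg n (by norm_num)
  have h4 : PySem.Int.mod n (100 ^ 4) < 100000000 := by
    rw [PySem.Int.mod_eq_emod_of_pos hb]
    have := Int.emod_lt_of_pos n hb
    omega
  exact quartet_core _ h0 h4

-- ===== VERDICT (by name: the statement is the Claim_ definition above) =====
theorem quartet_spec : Claim_equal_quartet := by
  intro n _
  unfold Spec_quartet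
  exact quartet_spec_aux n
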